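-- pv_equiv track=rewrite | github.com/foobar112358/foobar-10 | find_the_access_codes.py | answer
-- ===== SOURCE A (Python) =====
-- def answer(l):
--     tot=0
--     l_div = [0]
--     for i in range(1, len(l)):
--         divisors = 0
--         for j in range(i):
--             if l[i] % l[j] == 0:
--                 divisors += 1
--                 tot += l_div[j]
--         l_div.append(divisors)
--
--     return tot
-- ===== SOURCE B (Python) =====
-- def answer(l):
--     n = len(l)
--     total = 0
--     for j in range(n):
--         left = 0
--         for i in range(j):
--             if l[j] % l[i] == 0:
--                 left += 1
--         right = 0
--         for k in range(j + 1, n):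
--             if l[k] % l[j] == 0:
--                 right += 1
--         total += left * right
--     return total
-- ===== Notes on version B (the rewrite author's own statement) =====
-- stated objective: alternative
-- what changed: Replaces A's dynamic program (which stores per-index divisor counts in l_div and accumulates l_div[j] while scanning pairs) by the direct per-middle-element count: for each j multiply the number of left divisors by the number of right multiples and sum the products.
import Mathlib
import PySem

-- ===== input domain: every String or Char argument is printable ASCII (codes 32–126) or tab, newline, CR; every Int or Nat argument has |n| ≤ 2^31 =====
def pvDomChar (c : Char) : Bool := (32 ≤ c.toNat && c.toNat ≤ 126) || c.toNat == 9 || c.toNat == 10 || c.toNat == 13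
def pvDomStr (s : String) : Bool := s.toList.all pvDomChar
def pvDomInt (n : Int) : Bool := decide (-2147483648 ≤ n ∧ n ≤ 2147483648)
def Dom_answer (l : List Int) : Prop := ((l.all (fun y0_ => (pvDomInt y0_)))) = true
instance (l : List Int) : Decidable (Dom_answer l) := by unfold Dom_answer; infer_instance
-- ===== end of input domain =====

-- B replaces A's l_div dynamic program by the direct per-middle-element count (left divisors × right multiples); alternative decomposition, same O(n^2) cost.

-- ===== PORT A =====
def answer (l : List Int) : Int :=
  ((PySem.List.pyRange 1 (l.length : Int) 1).foldl
    (fun (s : Int × List Int) i =>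
      let t := (PySem.List.pyRange 0 i 1).foldl
        (fun (t : Int × Int) j =>
          if PySem.Int.mod (PySem.List.pyGetD l i 0) (PySem.List.pyGetD l j 0) == 0 then
            (t.1 + 1, t.2 + PySem.List.pyGetD s.2 j 0)
          else t) (0, s.1)
      (t.2, s.2 ++ [t.1]))
    (0, ([0] : List Int))).1

-- ===== PORT B =====
def answer_alt (l : List Int) : Int :=
  (PySem.List.pyRange 0 (l.length : Int) 1).foldl
    (fun total j =>
      let left := (PySem.List.pyRange 0 j 1).foldl
        (fun acc i => if PySem.Int.mod (PySem.List.pyGetD l j 0) (PySem.List.pyGetD l i 0) == 0 then acc + 1 else acc) 0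
      let right := (PySem.List.pyRange (j + 1) (l.length : Int) 1).foldl
        (fun acc k => if PySem.Int.mod (PySem.List.pyGetD l k 0) (PySem.List.pyGetD l j 0) == 0 then acc + 1 else acc) 0
      total + left * right) 0

-- ===== PRECONDITION & SPEC =====
-- Pre_ excludes exactly the inputs on which A raises ZeroDivisionError: a zero element anywhere before the last position.
def Pre_answer (l : List Int) : Prop := ∀ x ∈ l.dropLast, x ≠ 0
instance (l : List Int) : Decidable (Pre_answer l) := by unfold Pre_answer; infer_instance
def pvWitness_answer : List Int := [1, 2, 4]
def Spec_answer (l : List Int) (out : Int) : Prop := out = answer_alt l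
instance (l : List Int) (out : Int) : Decidable (Spec_answer l out) := by unfold Spec_answer; infer_instance

-- ===== CLAIM (what is proved, stated in full; the proofs are below) =====
def Claim_equal_answer : Prop := ∀ (l : List Int), Dom_answer l → Pre_answer l → Spec_answer l (answer l)

-- ===== LEMMAS AND PROOFS =====

-- l[i] with default 0 (all loop indices are in range)
def gI (l : List Int) (i : Nat) : Int := l.getD i 0
-- "l[b] is divisible by l[a]"
def Db (l : List Int) (a b : Nat) : Bool := PySem.Int.mod (gI l b) (gI l a) == 0
-- number of left divisors of position j (= A's l_div[j], B's `left`)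
def dv (l : List Int) (j : Nat) : Int := ((List.range j).countP (fun k => Db l k j) : Int)
-- number of right multiples of position j within the first n positions (B's `right`)
def rvm (l : List Int) (n j : Nat) : Int := ((List.range (n - (j + 1))).countP (fun k => Db l j (j + 1 + k)) : Int)
-- A's running total after processing rows < n
def ssum (l : List Int) (n : Nat) : Int :=
  ((List.range n).map (fun i => (((List.range i).filter (fun j => Db l j i)).map (dv l)).sum)).sum

lemma sum_map_ite_filter (f : Nat → Int) (p : Nat → Bool) (xs : List Nat) :
    (xs.map (fun j => if p j then f j else 0)).sum = ((xs.filter p).map f).sum := by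
  induction xs with
  | nil => rfl
  | cons x xs ih => by_cases h : p x <;> simp [h, ih]

lemma sum_map_add (f g : Nat → Int) (xs : List Nat) :
    (xs.map (fun j => f j + g j)).sum = (xs.map f).sum + (xs.map g).sum := by
  induction xs with
  | nil => rfl
  | cons x xs ih => simp [ih]; ring

lemma ite_prod (c : Prop) [Decidable c] (t : Int × Int) (x y : Int) :
    (if c then (t.1 + x, t.2 + y) else t) = (if c then t.1 + x else t.1, if c then t.2 + y else t.2) := by
  split <;> rfl

lemma rvm_succ (l : List Int) (n j : Nat) (h : j < n) :
    rvm l (n + 1) j = rvm l n j + (if Db l j n then 1 else 0) := by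
  unfold rvm
  have h1 : n + 1 - (j + 1) = (n - (j + 1)) + 1 := by omega
  have h2 : j + 1 + (n - (j + 1)) = n := by omega
  rw [h1, List.range_succ]
  by_cases hd : Db l j n <;> simp [List.countP_append, h2, hd]

lemma rvm_last (l : List Int) (n : Nat) : rvm l (n + 1) n = 0 := by
  simp [rvm]

-- Fubini: A's double sum over (j, i) pairs equals B's per-middle-element products.
lemma fubini (l : List Int) (n : Nat) :
    ssum l n = ((List.range n).map (fun j => dv l j * rvm l n j)).sum := by
  induction n with
  | zero => rfl
  | succ n ih =>
    have step : ((List.range (n + 1)).map (fun j => dv l j * rvm l (n + 1) j)).sum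
        = ((List.range n).map (fun j => dv l j * rvm l n j)).sum
          + (((List.range n).filter (fun j => Db l j n)).map (dv l)).sum := by
      rw [List.range_succ, List.map_append, List.sum_append]
      have hmap : (List.range n).map (fun j => dv l j * rvm l (n + 1) j)
          = (List.range n).map (fun j => dv l j * rvm l n j + (if Db l j n then dv l j else 0)) := by
        apply List.map_congr_left
        intro j hj
        rw [rvm_succ l n j (List.mem_range.mp hj)]
        by_cases hd : Db l j n
        · simp [hd]
          ring
        · simp [hd]
      rw [hmap, sum_map_add, sum_map_ite_filter]
      simp [rvm_last]
    have expand : ssum l (n + 1) = ssum l n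
        + (((List.range n).filter (fun j => Db l j n)).map (dv l)).sum := by
      unfold ssum
      rw [List.range_succ, List.map_append, List.sum_append]
      simp
    rw [expand, step, ih]

-- characterize A's inner loop
lemma innerA (l : List Int) (n : Nat) (t0 : Int) :
    (PySem.List.pyRange 0 (n : Int) 1).foldl
      (fun (t : Int × Int) j =>
        if PySem.Int.mod (PySem.List.pyGetD l (n : Int) 0) (PySem.List.pyGetD l j 0) == 0 then
          (t.1 + 1, t.2 + PySem.List.pyGetD ((List.range n).map (dv l)) j 0)
        else t) (0, t0)
    = (dv l n, t0 + (((List.range n).filter (fun j => Db l j n)).map (dv l)).sum) := by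
  rw [PySem.List.pyRange_zero_nat, List.foldl_map]
  have hcong : ∀ (t : Int × Int) (j : Nat), j ∈ List.range n →
      (if PySem.Int.mod (PySem.List.pyGetD l (n : Int) 0) (PySem.List.pyGetD l (j : Int) 0) == 0 then
        (t.1 + 1, t.2 + PySem.List.pyGetD ((List.range n).map (dv l)) (j : Int) 0)
      else t)
      = (if Db l j n then t.1 + 1 else t.1, if Db l j n then t.2 + dv l j else t.2) := by
    intro t j hj
    have hj' : j < n := List.mem_range.mp hj
    have : PySem.List.pyGetD ((List.range n).map (dv l)) (j : Int) 0 = dv l j := by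
      rw [PySem.List.pyGetD_natCast, PySem.List.getD_map_range _ _ _ _ hj']
    rw [this]
    simp only [Db, gI, PySem.List.pyGetD_natCast]
    rw [ite_prod]
    rfl
  rw [PySem.List.foldl_congr_mem _ _
        (fun (t : Int × Int) j => (if Db l j n then t.1 + 1 else t.1, if Db l j n then t.2 + dv l j else t.2)) _ hcong]
  rw [PySem.List.foldl_prod_mk (f := fun a j => if Db l j n then a + 1 else a)
        (g := fun a j => if Db l j n then a + dv l j else a)]
  rw [PySem.List.foldl_if_add_one, PySem.List.foldl_if_eq_foldl_filter, PySem.List.foldl_add]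
  simp [dv]

-- characterize A's outer loop
lemma outerA (l : List Int) (n : Nat) (hn : 1 ≤ n) :
    (PySem.List.pyRange 1 (n : Int) 1).foldl
      (fun (s : Int × List Int) i =>
        let t := (PySem.List.pyRange 0 i 1).foldl
          (fun (t : Int × Int) j =>
            if PySem.Int.mod (PySem.List.pyGetD l i 0) (PySem.List.pyGetD l j 0) == 0 then
              (t.1 + 1, t.2 + PySem.List.pyGetD s.2 j 0)
            else t) (0, s.1)
        (t.2, s.2 ++ [t.1]))
      (0, ([0] : List Int))
    = (ssum l n, (List.range n).map (dv l)) := by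
  induction n with
  | zero => omega
  | succ n ih =>
    by_cases h1 : 1 ≤ n
    · have hcast : ((n : Int) + 1) = ((n + 1 : Nat) : Int) := by push_cast; ring
      rw [← hcast, PySem.List.pyRange_one_succ_right (by exact_mod_cast h1), List.foldl_append,
        ih h1]
      simp only [List.foldl_cons, List.foldl_nil]
      rw [innerA l n (ssum l n)]
      have e1 : ssum l (n + 1) = ssum l n
          + (((List.range n).filter (fun j => Db l j n)).map (dv l)).sum := by
        unfold ssum
        rw [List.range_succ, List.map_append, List.sum_append]
        simp
      dsimp only
      rw [e1, List.range_succ, List.map_append]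
      rfl
    · have hn0 : n = 0 := by omega
      subst hn0
      rw [PySem.List.pyRange_one_eq_nil (by norm_num)]
      simp [ssum, dv, List.range_succ]

lemma altB (l : List Int) :
    answer_alt l = ((List.range l.length).map (fun j => dv l j * rvm l l.length j)).sum := by
  unfold answer_alt
  rw [PySem.List.pyRange_zero_nat, List.foldl_map]
  have hcong : ∀ (total : Int) (j : Nat), j ∈ List.range l.length →
      ((fun total (j : Int) =>
        let left := (PySem.List.pyRange 0 j 1).foldl
          (fun acc i => if PySem.Int.mod (PySem.List.pyGetD l j 0) (PySem.List.pyGetD l i 0) == 0 then acc + 1 else acc) 0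
        let right := (PySem.List.pyRange (j + 1) (l.length : Int) 1).foldl
          (fun acc k => if PySem.Int.mod (PySem.List.pyGetD l k 0) (PySem.List.pyGetD l j 0) == 0 then acc + 1 else acc) 0
        total + left * right) total (j : Int))
      = total + dv l j * rvm l l.length j := by
    intro total j hj
    have hj' : j < l.length := List.mem_range.mp hj
    have hleft : (PySem.List.pyRange 0 (j : Int) 1).foldl
        (fun acc i => if PySem.Int.mod (PySem.List.pyGetD l (j : Int) 0) (PySem.List.pyGetD l i 0) == 0 then acc + 1 else acc) 0
        = dv l j := by
      rw [PySem.List.pyRange_zero_nat, List.foldl_map]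
      have : ∀ (acc : Int) (i : Nat), i ∈ List.range j →
          (if PySem.Int.mod (PySem.List.pyGetD l (j : Int) 0) (PySem.List.pyGetD l (i : Int) 0) == 0 then acc + 1 else acc)
          = (if Db l i j then acc + 1 else acc) := by
        intro acc i _
        simp [Db, gI, PySem.List.pyGetD_natCast]
      rw [PySem.List.foldl_congr_mem _ _ (fun (acc : Int) i => if Db l i j then acc + 1 else acc) _ this,
        PySem.List.foldl_if_add_one]
      simp [dv]
    have hright : (PySem.List.pyRange ((j : Int) + 1) (l.length : Int) 1).foldl
        (fun acc k => if PySem.Int.mod (PySem.List.pyGetD l k 0) (PySem.List.pyGetD l (j : Int) 0) == 0 then acc + 1 else acc) 0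
        = rvm l l.length j := by
      rw [PySem.List.pyRange_one, List.foldl_map]
      have htn : ((l.length : Int) - ((j : Int) + 1)).toNat = l.length - (j + 1) := by omega
      rw [htn]
      have : ∀ (acc : Int) (k : Nat), k ∈ List.range (l.length - (j + 1)) →
          (if PySem.Int.mod (PySem.List.pyGetD l ((j : Int) + 1 + (k : Int)) 0) (PySem.List.pyGetD l (j : Int) 0) == 0 then acc + 1 else acc)
          = (if Db l j (j + 1 + k) then acc + 1 else acc) := by
        intro acc k _
        have hc : ((j : Int) + 1 + (k : Int)) = ((j + 1 + k : Nat) : Int) := by push_cast; ring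
        rw [hc, PySem.List.pyGetD_natCast, PySem.List.pyGetD_natCast]
        rfl
      rw [PySem.List.foldl_congr_mem _ _ (fun (acc : Int) k => if Db l j (j + 1 + k) then acc + 1 else acc) _ this,
        PySem.List.foldl_if_add_one]
      simp [rvm]
    dsimp only
    rw [hleft, hright]
  rw [PySem.List.foldl_congr_mem _ _ (fun total j => total + dv l j * rvm l l.length j) _ hcong,
    PySem.List.foldl_add]
  simp

-- ===== VERDICT (by name: the statement is the Claim_ definition above) =====
theorem answer_spec : Claim_equal_answer := by
  intro l _ _
  unfold Spec_answer
  rw [altB, ← fubini]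
  unfold answer
  by_cases hn : 1 ≤ l.length
  · rw [outerA l l.length hn]
  · have h0 : l.length = 0 := by omega
    rw [h0]
    simp [PySem.List.pyRange_one_eq_nil, ssum]
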